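-- pv_equiv track=rewrite | github.com/vjedulla/edbnVizual | edbn/eDBN/GenerateModel.py | get_max_tranisitive_closure
-- ===== SOURCE A (Python) =====
-- def get_max_tranisitive_closure(relations, closure = None, size = 0, prefix = ""):
--     if not closure:
--         closure = []
--
--     max_size = 0
--     max_closure = []
--
--     if len(closure) > 0 and closure[0][0] == closure[-1][1]:
--         return size, closure
--
--     for r in relations:
--         if len(closure) == 0 or (r[0] == closure[-1][1] and r not in closure and (r[1], r[0]) not in closure):
--             max, found_closure = get_max_tranisitive_closure(relations, closure + [r], size + 1, prefix + "  ")
--             if max > max_size: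
--                 max_size = max
--                 max_closure = found_closure
--
--     return max_size, max_closure
-- ===== SOURCE B (Python) =====
-- def get_max_tranisitive_closure(relations, closure=None, size=0, prefix=""):
--     closure = list(closure) if closure else []
--     if closure and closure[0][0] == closure[-1][1]:
--         return size, closure
--     best_size, best_closure = 0, []
--     stack = [(closure, size)]
--     while stack:
--         cl, sz = stack.pop()
--         if cl and cl[0][0] == cl[-1][1]:
--             if sz > best_size:
--                 best_size, best_closure = sz, cl
--             continue
--         for r in reversed(relations):
--             if not cl or (r[0] == cl[-1][1] and r not in cl and (r[1], r[0]) not in cl):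
--                 stack.append((cl + [r], sz + 1))
--     return best_size, best_closure
-- ===== Notes on version B (the rewrite author's own statement) =====
-- stated objective: alternative
-- what changed: Replaces A's recursive DFS, in which every call computes and returns its own subtree's (max_size, max_closure), by an iterative explicit-stack DFS that threads a single global best and pushes extensions in reverse order so they are visited in A's preorder.
import Mathlib
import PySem

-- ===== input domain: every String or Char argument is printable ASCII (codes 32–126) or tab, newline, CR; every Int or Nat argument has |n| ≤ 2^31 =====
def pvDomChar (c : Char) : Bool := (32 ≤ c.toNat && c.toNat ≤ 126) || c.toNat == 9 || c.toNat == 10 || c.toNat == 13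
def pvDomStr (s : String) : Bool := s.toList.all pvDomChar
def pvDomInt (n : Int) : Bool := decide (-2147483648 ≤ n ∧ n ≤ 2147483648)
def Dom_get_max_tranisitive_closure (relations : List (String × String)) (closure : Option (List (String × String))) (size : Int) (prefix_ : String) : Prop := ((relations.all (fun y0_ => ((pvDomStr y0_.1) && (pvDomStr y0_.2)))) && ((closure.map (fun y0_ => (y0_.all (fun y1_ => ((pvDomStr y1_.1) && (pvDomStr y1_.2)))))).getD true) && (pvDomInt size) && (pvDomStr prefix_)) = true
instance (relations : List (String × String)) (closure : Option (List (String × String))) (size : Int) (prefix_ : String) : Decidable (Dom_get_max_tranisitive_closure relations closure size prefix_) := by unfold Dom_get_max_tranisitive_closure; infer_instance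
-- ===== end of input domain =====

-- B replaces A's recursive DFS (each call returning its subtree's best chain) by an
-- iterative explicit-stack DFS threading one global best; same result, alternative structure.

-- shared small predicates (the two Pythons spell the identical tests)
-- Python: len(closure) > 0 and closure[0][0] == closure[-1][1]
def pvCyc (cl : List (String × String)) : Bool :=
  match cl.head?, cl.getLast? with
  | some a, some z => a.1 == z.2
  | _, _ => false

-- Python: len(closure) == 0 or (r[0] == closure[-1][1] and r not in closure and (r[1], r[0]) not in closure)
def pvGuard (cl : List (String × String)) (r : String × String) : Bool :=
  match cl.getLast? with
  | none => true
  | some z => r.1 == z.2 && !cl.contains r && !cl.contains (r.2, r.1)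

-- termination measure: number of relations not yet in the closure
def pvM (relations cl : List (String × String)) : Nat :=
  (relations.filter (fun r => !cl.contains r)).length

-- lemmas needed by the ports' decreasing_by only
theorem pv_length_filter_mono {α : Type} (p q : α → Bool) (hpq : ∀ x, p x = true → q x = true) :
    ∀ l : List α, (l.filter p).length ≤ (l.filter q).length := by
  intro l
  induction l with
  | nil => simp
  | cons x xs ih =>
    by_cases hp : p x = true
    · simp [hp, hpq x hp]; omega
    · have : ¬ p x = true := hp
      simp [List.filter_cons, this]
      by_cases hq : q x = true <;> simp [hq] <;> omega

theorem pv_length_filter_lt {α : Type} (p q : α → Bool) (l : List α) (r : α)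
    (hr : r ∈ l) (hpq : ∀ x, p x = true → q x = true)
    (hp : p r = false) (hq : q r = true) :
    (l.filter p).length < (l.filter q).length := by
  induction l with
  | nil => cases hr
  | cons x xs ih =>
    rcases List.mem_cons.mp hr with h | h
    · subst h
      simp [hp, hq]
      have := pv_length_filter_mono p q hpq xs; omega
    · by_cases hpx : p x = true
      · simp [hpx, hpq x hpx]
        exact ih h
      · have h1 : ¬ p x = true := hpx
        simp [List.filter_cons, h1]
        by_cases hqx : q x = true
        · simp [hqx]; have := ih h; omega
        · simp [hqx]; exact ih h

theorem pvGuard_not_mem {cl : List (String × String)} {r : String × String}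
    (h : pvGuard cl r = true) : cl.contains r = false := by
  unfold pvGuard at h
  cases hl : cl.getLast? with
  | none =>
    have : cl = [] := List.getLast?_eq_none_iff.mp hl
    subst this; rfl
  | some z =>
    rw [hl] at h
    simp only [Bool.and_eq_true, Bool.not_eq_true'] at h
    exact h.1.2

theorem pvM_lt (relations cl : List (String × String)) (r : String × String)
    (hr : r ∈ relations) (hg : pvGuard cl r = true) :
    pvM relations (cl ++ [r]) < pvM relations cl := by
  unfold pvM
  apply pv_length_filter_lt _ _ _ r hr
  · intro x hx
    simp only [Bool.not_eq_true', List.contains_append] at hx ⊢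
    exact (Bool.or_eq_false_iff.mp hx).1
  · simp
  · simp only [Bool.not_eq_true']
    exact pvGuard_not_mem hg

-- ===== PORT A =====
-- literal transliteration of the recursive Python A; pvAloop is its `for r in relations` loop
mutual
def get_max_tranisitive_closure (relations : List (String × String)) (closure : Option (List (String × String))) (size : Int) (prefix_ : String) : Int × (List (String × String)) :=
  -- Python: if not closure: closure = []   (None and [] both become [])
  let cl := closure.getD []
  if pvCyc cl then (size, cl)
  else pvAloop relations relations (fun _ h => h) cl size prefix_ (0, [])
termination_by (pvM relations (closure.getD []), relations.length + 1)
decreasing_by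
  exact Prod.Lex.right _ (Nat.lt_succ_self _)

def pvAloop (relations : List (String × String)) (rs : List (String × String))
    (hsub : ∀ x ∈ rs, x ∈ relations) (cl : List (String × String)) (size : Int)
    (prefix_ : String) (acc : Int × (List (String × String))) : Int × (List (String × String)) :=
  match rs with
  | [] => acc
  | r :: rest =>
    if hg : pvGuard cl r = true then
      let res := get_max_tranisitive_closure relations (some (cl ++ [r])) (size + 1) (prefix_ ++ "  ")
      pvAloop relations rest (fun x hx => hsub x (List.mem_cons_of_mem r hx)) cl size prefix_
        (if res.1 > acc.1 then res else acc)
    else pvAloop relations rest (fun x hx => hsub x (List.mem_cons_of_mem r hx)) cl size prefix_ acc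
termination_by (pvM relations cl, rs.length)
decreasing_by
  · exact Prod.Lex.left _ _ (by
      simpa using pvM_lt relations cl r (hsub r (List.mem_cons_self)) hg)
  · exact Prod.Lex.right _ (Nat.lt_succ_self _)
  · exact Prod.Lex.right _ (Nat.lt_succ_self _)
end

-- ===== PORT B =====
-- weight of a stack entry / of the whole stack, for pvLoop's termination only
def pvWeight (relations cl : List (String × String)) : Nat :=
  (relations.length + 1) ^ pvM relations cl
def pvStackW (relations : List (String × String)) (st : List ((List (String × String)) × Int)) : Nat :=
  (st.map (fun s => pvWeight relations s.1)).sum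

-- Python: for r in reversed(relations): if <guard>: stack.append((cl + [r], sz + 1))
def pvPush (relations cl : List (String × String)) (sz : Int)
    (st : List ((List (String × String)) × Int)) : List ((List (String × String)) × Int) :=
  relations.reverse.foldl (fun s r => if pvGuard cl r then (cl ++ [r], sz + 1) :: s else s) st

theorem pv_foldl_consif {α β : Type} (g : α → Bool) (f : α → β) :
    ∀ (l : List α) (st : List β),
      l.foldl (fun s r => if g r then f r :: s else s) st = ((l.filter g).map f).reverse ++ st := by
  intro l
  induction l with
  | nil => simp
  | cons x xs ih =>
    intro st
    by_cases h : g x = true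
    · simp [h, ih (f x :: st)]
    · simp [h, ih st]

theorem pvPush_eq (relations cl : List (String × String)) (sz : Int)
    (st : List ((List (String × String)) × Int)) :
    pvPush relations cl sz st
      = ((relations.filter (pvGuard cl)).map (fun r => (cl ++ [r], sz + 1))) ++ st := by
  unfold pvPush
  rw [pv_foldl_consif]
  simp [List.filter_reverse, List.map_reverse]

theorem pvWeight_pos (relations cl : List (String × String)) : 0 < pvWeight relations cl :=
  pow_pos (by omega) _

theorem pvPush_weight_lt (relations cl : List (String × String)) (sz : Int)
    (st : List ((List (String × String)) × Int)) :
    pvStackW relations (pvPush relations cl sz st) < pvWeight relations cl + pvStackW relations st := by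
  rw [pvPush_eq]
  unfold pvStackW
  rw [List.map_append, List.sum_append]
  have hmm : ((relations.filter (pvGuard cl)).map (fun r => (cl ++ [r], sz + 1))).map
      (fun s => pvWeight relations s.1) = (relations.filter (pvGuard cl)).map
      (fun r => pvWeight relations (cl ++ [r])) := by
    simp [List.map_map, Function.comp]
  rw [hmm]
  have key : ((relations.filter (pvGuard cl)).map (fun r => pvWeight relations (cl ++ [r]))).sum
      < pvWeight relations cl := by
    cases hk : pvM relations cl with
    | zero =>
      have hemp : relations.filter (pvGuard cl) = [] := by
        rcases h : relations.filter (pvGuard cl) with _ | ⟨r, rest⟩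
        · rfl
        · exfalso
          have hr : r ∈ relations.filter (pvGuard cl) := by rw [h]; exact List.mem_cons_self
          have ⟨hrel, hgd⟩ := List.mem_filter.mp hr
          have := pvM_lt relations cl r hrel hgd
          omega
      simp [hemp, pvWeight, hk]
    | succ k =>
      have hb : ∀ x ∈ (relations.filter (pvGuard cl)).map (fun r => pvWeight relations (cl ++ [r])),
          x ≤ (relations.length + 1) ^ k := by
        intro x hx
        obtain ⟨r, hr, rfl⟩ := List.mem_map.mp hx
        have ⟨hrel, hgd⟩ := List.mem_filter.mp hr
        have hlt := pvM_lt relations cl r hrel hgd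
        rw [hk] at hlt
        exact Nat.pow_le_pow_right (by omega) (by omega)
      have hsum := List.sum_le_card_nsmul _ _ hb
      have hlen : ((relations.filter (pvGuard cl)).map
          (fun r => pvWeight relations (cl ++ [r]))).length ≤ relations.length := by
        rw [List.length_map]; exact List.length_filter_le _ _
      have hpow : 0 < (relations.length + 1) ^ k := pow_pos (by omega) _
      have : relations.length * (relations.length + 1) ^ k < (relations.length + 1) ^ (k + 1) := by
        have h2 := mul_lt_mul_of_pos_right
          (show relations.length < relations.length + 1 by omega) hpow
        calc relations.length * (relations.length + 1) ^ k
            < (relations.length + 1) * (relations.length + 1) ^ k := h2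
          _ = (relations.length + 1) ^ (k + 1) := by ring
      simp only [smul_eq_mul] at hsum
      calc ((relations.filter (pvGuard cl)).map (fun r => pvWeight relations (cl ++ [r]))).sum
          ≤ _ * (relations.length + 1) ^ k := hsum
        _ ≤ relations.length * (relations.length + 1) ^ k := Nat.mul_le_mul_right _ hlen
        _ < (relations.length + 1) ^ (k + 1) := this
        _ = pvWeight relations cl := by rw [pvWeight, hk]
  omega

-- Python: while stack: cl, sz = stack.pop(); …  (stack head = top)
def pvLoop (relations : List (String × String)) (stack : List ((List (String × String)) × Int))
    (best : Int × (List (String × String))) : Int × (List (String × String)) :=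
  match stack with
  | [] => best
  | (cl, sz) :: st =>
    if pvCyc cl then
      pvLoop relations st (if sz > best.1 then (sz, cl) else best)
    else
      pvLoop relations (pvPush relations cl sz st) best
termination_by pvStackW relations stack
decreasing_by
  · have := pvWeight_pos relations cl
    simp [pvStackW]; omega
  · have := pvPush_weight_lt relations cl sz st
    simp [pvStackW] at this ⊢; omega

def get_max_tranisitive_closure_alt (relations : List (String × String)) (closure : Option (List (String × String))) (size : Int) (prefix_ : String) : Int × (List (String × String)) :=
  -- Python: closure = list(closure) if closure else []
  let cl := closure.getD []
  if pvCyc cl then (size, cl)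
  else pvLoop relations [(cl, size)] (0, [])

-- ===== PRECONDITION & SPEC =====
def Spec_get_max_tranisitive_closure (relations : List (String × String)) (closure : Option (List (String × String))) (size : Int) (prefix_ : String) (out : Int × (List (String × String))) : Prop := out = get_max_tranisitive_closure_alt relations closure size prefix_
instance (relations : List (String × String)) (closure : Option (List (String × String))) (size : Int) (prefix_ : String) (out : Int × (List (String × String))) : Decidable (Spec_get_max_tranisitive_closure relations closure size prefix_ out) := by unfold Spec_get_max_tranisitive_closure; infer_instance

-- ===== CLAIM (what is proved, stated in full; the proofs are below) =====
def Claim_equal_get_max_tranisitive_closure : Prop := ∀ (relations : List (String × String)) (closure : Option (List (String × String))) (size : Int) (prefix_ : String), Dom_get_max_tranisitive_closure relations closure size prefix_ → Spec_get_max_tranisitive_closure relations closure size prefix_ (get_max_tranisitive_closure relations closure size prefix_)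

-- ===== LEMMAS AND PROOFS =====

-- the strict "keep the first best" update both programs perform
def pvStep (b x : Int × (List (String × String))) : Int × (List (String × String)) :=
  if x.1 > b.1 then x else b

theorem pvStep_fst_le (b x : Int × (List (String × String))) : b.1 ≤ (pvStep b x).1 := by
  unfold pvStep; split_ifs with h <;> omega

theorem pvStep_assoc (b x F : Int × (List (String × String))) (hb : 0 ≤ b.1) :
    pvStep (pvStep b x) F = pvStep b (pvStep (pvStep (0, ([] : List (String × String))) x) F) := by
  unfold pvStep
  split_ifs <;> first | rfl | (exfalso; simp_all; omega)

-- one step of A's loop, seen as a fold function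
def pvG (relations cl : List (String × String)) (sz : Int) (q : String)
    (acc : Int × (List (String × String))) (r : String × String) : Int × (List (String × String)) :=
  if pvGuard cl r = true then
    pvStep acc (get_max_tranisitive_closure relations (some (cl ++ [r])) (sz + 1) q)
  else acc

theorem pvAloop_eq_foldl (relations : List (String × String)) :
    ∀ (rs : List (String × String)) (h : ∀ x ∈ rs, x ∈ relations) (cl : List (String × String))
      (sz : Int) (p : String) (acc : Int × (List (String × String))),
      pvAloop relations rs h cl sz p acc = rs.foldl (pvG relations cl sz (p ++ "  ")) acc := by
  intro rs
  induction rs with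
  | nil => intro h cl sz p acc; simp [pvAloop]
  | cons r rest ih =>
    intro h cl sz p acc
    rw [pvAloop]
    by_cases hg : pvGuard cl r = true
    · rw [dif_pos hg]
      rw [List.foldl_cons]
      simp only [pvG, hg, if_pos]
      rw [ih]
      rfl
    · rw [dif_neg hg]
      rw [List.foldl_cons]
      simp only [pvG, hg, if_neg, Bool.false_eq_true, not_false_iff]
      exact ih _ cl sz p acc

theorem pvA_some_getD (relations : List (String × String)) (closure : Option (List (String × String)))
    (sz : Int) (p : String) :
    get_max_tranisitive_closure relations closure sz p
      = get_max_tranisitive_closure relations (some (closure.getD [])) sz p := by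
  cases closure with
  | none => simp only [get_max_tranisitive_closure, Option.getD]
  | some c => rfl

theorem pvFoldl_shift (relations cl : List (String × String)) (sz : Int) (q : String) :
    ∀ (rs : List (String × String)) (b : Int × (List (String × String))), 0 ≤ b.1 →
      rs.foldl (pvG relations cl sz q) b
        = pvStep b (rs.foldl (pvG relations cl sz q) (0, [])) := by
  intro rs
  induction rs with
  | nil =>
    intro b hb
    simp only [List.foldl_nil, pvStep]
    rw [if_neg (by omega)]
  | cons r rest ih =>
    intro b hb
    by_cases hg : pvGuard cl r = true
    · simp only [List.foldl_cons, pvG, hg, if_pos]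
      rw [ih (pvStep b _) (le_trans hb (pvStep_fst_le b _))]
      rw [ih (pvStep (0, []) _) (pvStep_fst_le (0, []) _)]
      exact pvStep_assoc b _ _ hb
    · simp only [List.foldl_cons, pvG, hg, if_neg, not_false_iff]
      exact ih b hb

theorem pvFoldl_zero_or_gt (relations cl : List (String × String)) (sz : Int) (q : String) :
    ∀ (rs : List (String × String)) (b : Int × (List (String × String))),
      rs.foldl (pvG relations cl sz q) b = b ∨ b.1 < (rs.foldl (pvG relations cl sz q) b).1 := by
  intro rs
  induction rs with
  | nil => intro b; left; rfl
  | cons r rest ih =>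
    intro b
    by_cases hg : pvGuard cl r = true
    · simp only [List.foldl_cons, pvG, hg, if_pos]
      rcases ih (pvStep b (get_max_tranisitive_closure relations (some (cl ++ [r])) (sz + 1) q)) with h | h
      · rw [h]
        unfold pvStep
        split_ifs with h2
        · right; simpa using h2
        · left; rfl
      · right
        calc b.1 ≤ (pvStep b _).1 := pvStep_fst_le b _
          _ < _ := h
    · simp only [List.foldl_cons, pvG, hg, if_neg, not_false_iff]
      exact ih b

-- A's body on a non-cyclic closure, through the fold formulation
theorem pvA_noncyc (relations cl : List (String × String)) (sz : Int) (p : String)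
    (hcyc : ¬ pvCyc cl = true) :
    get_max_tranisitive_closure relations (some cl) sz p
      = relations.foldl (pvG relations cl sz (p ++ "  ")) (0, []) := by
  rw [get_max_tranisitive_closure]
  simp only [Option.getD_some, hcyc, if_false, if_neg hcyc]
  exact pvAloop_eq_foldl relations relations _ cl sz p (0, [])

-- MAIN SIMULATION: popping one state equals folding A's subtree value into the running best
theorem pvMain (relations : List (String × String)) :
    ∀ (n : Nat) (cl : List (String × String)), pvM relations cl < n →
      ∀ (sz : Int) (st : List ((List (String × String)) × Int))
        (best : Int × (List (String × String))) (p : String), 0 ≤ best.1 →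
      pvLoop relations ((cl, sz) :: st) best
        = pvLoop relations st (pvStep best (get_max_tranisitive_closure relations (some cl) sz p)) := by
  intro n
  induction n with
  | zero => intro cl h; exact absurd h (Nat.not_lt_zero _)
  | succ n ih =>
    intro cl hcl sz st best p hb
    by_cases hcyc : pvCyc cl = true
    · have hA : get_max_tranisitive_closure relations (some cl) sz p = (sz, cl) := by
        rw [get_max_tranisitive_closure]
        simp [hcyc]
      rw [pvLoop, hA]
      simp only [hcyc, if_true, pvStep]
    · rw [pvLoop]
      simp only [hcyc, if_false]
      rw [pvPush_eq]
      have inner : ∀ (rs : List (String × String)), (∀ x ∈ rs, x ∈ relations) →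
          ∀ (st : List ((List (String × String)) × Int)) (best : Int × (List (String × String))),
            0 ≤ best.1 →
          pvLoop relations (((rs.filter (pvGuard cl)).map (fun r => (cl ++ [r], sz + 1))) ++ st) best
            = pvLoop relations st (rs.foldl (pvG relations cl sz (p ++ "  ")) best) := by
        intro rs
        induction rs with
        | nil => intro _ st best _; simp
        | cons r rest ihr =>
          intro hsub st best hb
          by_cases hg : pvGuard cl r = true
          · simp only [List.filter_cons, hg, if_pos, List.map_cons, List.cons_append]
            rw [ih (cl ++ [r])
                (by have := pvM_lt relations cl r (hsub r (List.mem_cons_self)) hg; omega)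
                (sz + 1) _ best (p ++ "  ") hb]
            rw [ihr (fun x hx => hsub x (List.mem_cons_of_mem r hx)) st _
                (le_trans hb (pvStep_fst_le best _))]
            simp only [List.foldl_cons, pvG, hg, if_pos]
          · simp only [List.filter_cons, hg, if_neg, not_false_iff, List.foldl_cons, pvG]
            exact ihr (fun x hx => hsub x (List.mem_cons_of_mem r hx)) st best hb
      rw [inner relations (fun _ h => h) st best hb]
      rw [pvA_noncyc relations cl sz p hcyc]
      rw [pvFoldl_shift relations cl sz (p ++ "  ") relations best hb]
      simp

-- ===== VERDICT (by name: the statement is the Claim_ definition above) =====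
theorem get_max_tranisitive_closure_spec : Claim_equal_get_max_tranisitive_closure := by
  intro relations closure size prefix_ _
  unfold Spec_get_max_tranisitive_closure
  rw [pvA_some_getD relations closure size prefix_]
  unfold get_max_tranisitive_closure_alt
  by_cases hcyc : pvCyc (closure.getD []) = true
  · rw [get_max_tranisitive_closure]
    simp [hcyc]
  · rw [if_neg hcyc]
    rw [pvMain relations (pvM relations (closure.getD []) + 1) (closure.getD [])
        (Nat.lt_succ_self _) size [] (0, []) prefix_ (le_refl 0)]
    rw [pvLoop]
    rw [pvA_noncyc relations (closure.getD []) size prefix_ hcyc]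
    rcases pvFoldl_zero_or_gt relations (closure.getD []) size (prefix_ ++ "  ") relations (0, [])
      with h | h
    · rw [h]; simp [pvStep]
    · simp only [pvStep]
      rw [if_pos (by simpa using h)]
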